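-- pv_equiv track=rewrite | github.com/pharesim/propolis-wiki | updater.py | formatPostLink
-- ===== SOURCE A (Python) =====
-- def formatPostLink(permlink):
--     split = permlink.split("-")
--     if(len(split) > 1):
--         permlink = ''
--         for i, val in enumerate(split):
--             permlink += formatPostLinkSegment(val)
--             if(i+1 < len(split)):
--                 permlink += '-'
--     else:
--         permlink = formatPostLinkSegment(permlink)
--     return permlink
--
-- def formatPostLinkSegment(segment):
--     split = segment.split(':')
--     if(len(split) > 1):
--         segment = ''
--         for i, s in enumerate(split):
--             segment += formatPostLinkSegment(s)
--             if(i+1 < len(split)):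
--                 segment += ':'
--         return segment
--     keeplow = ['Disambiguation','disambiguation']
--     if(segment not in keeplow):
--         return segment.capitalize()
--     if(segment in keeplow):
--         return segment.lower()
--     return segment
-- ===== SOURCE B (Python) =====
-- def _cap(seg):
--     if seg in ('Disambiguation', 'disambiguation'):
--         return seg.lower()
--     return seg.capitalize()
--
-- def formatPostLink(permlink):
--     # single left-to-right scan: emit capitalized token at each delimiter
--     out = []
--     tok = []
--     for ch in permlink:
--         if ch == '-' or ch == ':':
--             out.append(_cap(''.join(tok)))
--             out.append(ch)
--             tok = []
--         else:
--             tok.append(ch)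
--     out.append(_cap(''.join(tok)))
--     return ''.join(out)
-- ===== Notes on version B (the rewrite author's own statement) =====
-- stated objective: simpler
-- what changed: Replaces the nested split-on-hyphen plus recursive split-on-colon joining loops by a single left-to-right character scan that emits each delimiter-free token capitalized and copies the delimiter characters through.
import Mathlib
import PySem

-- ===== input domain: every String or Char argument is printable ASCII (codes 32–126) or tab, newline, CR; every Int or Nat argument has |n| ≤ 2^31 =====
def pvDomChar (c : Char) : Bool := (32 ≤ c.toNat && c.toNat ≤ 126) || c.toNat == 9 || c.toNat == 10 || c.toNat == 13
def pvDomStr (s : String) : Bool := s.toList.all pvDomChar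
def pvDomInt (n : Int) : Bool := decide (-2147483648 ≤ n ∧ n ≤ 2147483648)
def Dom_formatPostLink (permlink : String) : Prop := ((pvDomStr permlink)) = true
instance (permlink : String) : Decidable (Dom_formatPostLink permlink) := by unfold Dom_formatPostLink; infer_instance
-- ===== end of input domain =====

-- B replaces A's split-on-hyphen plus recursive split-on-colon joining loops by a single
-- left-to-right character scan (objective: simpler, same O(n) cost).

-- ===== PORT A =====
-- str.capitalize(): first character uppercased, the rest lowercased (exact on ASCII)
def pyCapitalize (s : List Char) : List Char :=
  match s with
  | [] => []
  | c :: rest => PySem.Chars.upperChar c :: PySem.Chars.lower rest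

-- formatPostLinkSegment; the Nat argument is a fuel/totality guard for Python's
-- recursion (the recursive calls are on pieces of segment.split(':'), so the
-- supplied fuel segment.length + 1 is always enough; fuel 0 is never reached)
def segAuxA : Nat → List Char → List Char
  | 0, segment => segment  -- unreachable with the fuel supplied
  | fuel+1, segment =>
    let split := PySem.Chars.splitOn segment [':']
    if 1 < split.length then
      (PySem.List.enumerate split).foldl
        (fun acc p =>
          let acc := acc ++ segAuxA fuel p.2
          if p.1 + 1 < (split.length : Int) then acc ++ [':'] else acc) []
    else
      let keeplow : List (List Char) := ["Disambiguation".toList, "disambiguation".toList]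
      if segment ∉ keeplow then pyCapitalize segment
      else if segment ∈ keeplow then PySem.Chars.lower segment
      else segment

def formatPostLinkSegmentA (segment : List Char) : List Char :=
  segAuxA (segment.length + 1) segment

def formatPostLink (permlink : String) : String :=
  let split := PySem.Chars.splitOn permlink.toList ['-']
  if 1 < split.length then
    String.mk ((PySem.List.enumerate split).foldl
      (fun acc p =>
        let acc := acc ++ formatPostLinkSegmentA p.2
        if p.1 + 1 < (split.length : Int) then acc ++ ['-'] else acc) [])
  else
    String.mk (formatPostLinkSegmentA permlink.toList)

-- ===== PORT B =====
-- _cap of Source B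
def pvCapB (seg : List Char) : List Char :=
  if seg = "Disambiguation".toList ∨ seg = "disambiguation".toList then
    PySem.Chars.lower seg
  else
    pyCapitalize seg

def formatPostLink_alt (permlink : String) : String :=
  let r := permlink.toList.foldl
    (fun (st : List (List Char) × List Char) ch =>
      if ch = '-' ∨ ch = ':' then (st.1 ++ [pvCapB st.2, [ch]], ([] : List Char))
      else (st.1, st.2 ++ [ch]))
    (([] : List (List Char)), ([] : List Char))
  String.mk (PySem.Chars.join [] (r.1 ++ [pvCapB r.2]))

-- ===== PRECONDITION & SPEC =====
def Spec_formatPostLink (permlink : String) (out : String) : Prop := out = formatPostLink_alt permlink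
instance (permlink : String) (out : String) : Decidable (Spec_formatPostLink permlink out) := by unfold Spec_formatPostLink; infer_instance

-- ===== CLAIM (what is proved, stated in full; the proofs are below) =====
def Claim_equal_formatPostLink : Prop := ∀ (permlink : String), Dom_formatPostLink permlink → Spec_formatPostLink permlink (formatPostLink permlink)

-- ===== LEMMAS AND PROOFS =====

-- reference single-character splitter (proof-side only)
def splitRef (d : Char) : List Char → List (List Char)
  | [] => [[]]
  | c :: cs => if c = d then [] :: splitRef d cs
               else (splitRef d cs).modifyHead (fun t => c :: t)

def J2 (s : List Char) : List Char :=
  PySem.Chars.join [':'] ((splitRef ':' s).map pvCapB)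

def JA (s : List Char) : List Char :=
  PySem.Chars.join ['-'] ((splitRef '-' s).map J2)

def bodyB : List Char → List Char → List Char
  | tok, [] => pvCapB tok
  | tok, c :: cs =>
    if c = '-' ∨ c = ':' then pvCapB tok ++ c :: bodyB [] cs
    else bodyB (tok ++ [c]) cs

theorem modifyHead_id' (l : List (List Char)) :
    l.modifyHead (fun t => t) = l := by cases l <;> simp

theorem splitRef_ne_nil (d : Char) (s : List Char) : splitRef d s ≠ [] := by
  induction s with
  | nil => simp [splitRef]
  | cons c cs ih =>
    by_cases h : c = d <;> simp [splitRef, h]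
    cases hs : splitRef d cs with
    | nil => exact absurd hs ih
    | cons a t => simp

theorem go_spec (d : Char) : ∀ (l : List Char) (fuel : Nat) (cur : List Char)
    (acc : List (List Char)), l.length ≤ fuel →
    PySem.Chars.splitOn.go [d] fuel l cur acc
      = acc.reverse ++ (splitRef d l).modifyHead (fun t => cur.reverse ++ t) := by
  intro l
  induction l with
  | nil =>
    intro fuel cur acc _
    cases fuel <;> simp [PySem.Chars.splitOn.go, splitRef]
  | cons c rest ih =>
    intro fuel cur acc h
    cases fuel with
    | zero => simp at h
    | succ f =>
      by_cases hc : c = d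
      · subst hc
        have ih' := ih f [] (cur.reverse :: acc) (by simpa using h)
        simp [PySem.Chars.splitOn.go, List.isPrefixOf, splitRef, ih', modifyHead_id']
      · have ih' := ih f (c :: cur) acc (by simpa using h)
        have hbeq : (d == c) = false := by simp [Ne.symm hc]
        simp [PySem.Chars.splitOn.go, List.isPrefixOf, hbeq, splitRef, hc, ih']
        cases hs : splitRef d rest with
        | nil => exact absurd hs (splitRef_ne_nil d rest)
        | cons a t => simp

theorem splitOn_eq (d : Char) (l : List Char) :
    PySem.Chars.splitOn l [d] = splitRef d l := by
  have h := go_spec d l (l.length + 1) [] [] (by omega)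
  simpa [PySem.Chars.splitOn, modifyHead_id'] using h

theorem splitRef_prepend (d : Char) (pre rest : List Char) (h : d ∉ pre) :
    splitRef d (pre ++ rest) = (splitRef d rest).modifyHead (fun t => pre ++ t) := by
  induction pre with
  | nil => simp [modifyHead_id']
  | cons c pre' ih =>
    have hc : c ≠ d := fun hcd => h (by simp [hcd])
    have ih' := ih (fun hm => h (List.mem_cons_of_mem _ hm))
    simp only [List.cons_append, splitRef, hc, if_false, ih']
    cases hs : splitRef d rest with
    | nil => exact absurd hs (splitRef_ne_nil d rest)
    | cons a t => simp

theorem splitRef_of_not_mem (d : Char) (s : List Char) (h : d ∉ s) :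
    splitRef d s = [s] := by
  have := splitRef_prepend d s [] h
  simpa [splitRef] using this

theorem not_mem_of_mem_splitRef (d : Char) : ∀ (s p : List Char),
    p ∈ splitRef d s → d ∉ p := by
  intro s
  induction s with
  | nil => intro p hp; simp [splitRef] at hp; simp [hp]
  | cons c cs ih =>
    intro p hp
    by_cases hc : c = d
    · simp [splitRef, hc] at hp
      rcases hp with hp | hp
      · simp [hp]
      · exact ih p hp
    · simp only [splitRef, hc, if_false] at hp
      cases hs : splitRef d cs with
      | nil => exact absurd hs (splitRef_ne_nil d cs)
      | cons a t =>
        rw [hs] at hp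
        simp at hp
        rcases hp with hp | hp
        · subst hp
          intro hm
          rcases List.mem_cons.mp hm with h1 | h1
          · exact hc h1.symm
          · exact ih a (hs ▸ List.mem_cons_self) h1
        · exact ih p (hs ▸ List.mem_cons_of_mem _ hp)

theorem one_lt_length_splitRef (d : Char) : ∀ (s : List Char), d ∈ s →
    1 < (splitRef d s).length := by
  intro s
  induction s with
  | nil => simp
  | cons c cs ih =>
    intro hm
    by_cases hc : c = d
    · have h1 : (splitRef d cs).length ≥ 1 :=
        List.length_pos_of_ne_nil (splitRef_ne_nil d cs)
      simp [splitRef, hc]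
      omega
    · have hm' : d ∈ cs := by
        rcases List.mem_cons.mp hm with h1 | h1
        · exact absurd h1.symm hc
        · exact h1
      have := ih hm'
      simp [splitRef, hc]
      omega

theorem not_mem_of_length_le (d : Char) (s : List Char)
    (h : ¬ 1 < (splitRef d s).length) : d ∉ s :=
  fun hm => h (one_lt_length_splitRef d s hm)

theorem joinLoop (f : List Char → List Char) (sep : List Char) (n : Int) :
    ∀ (l : List (List Char)) (start : Int) (acc : List Char),
      start + (l.length : Int) = n → l ≠ [] →
      (PySem.List.enumerate l start).foldl
        (fun acc p => if p.1 + 1 < n then acc ++ f p.2 ++ sep else acc ++ f p.2) acc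
      = acc ++ PySem.Chars.join sep (l.map f) := by
  intro l
  induction l with
  | nil => intro start acc _ hne; exact absurd rfl hne
  | cons x xs ih =>
    intro start acc hn _
    cases xs with
    | nil =>
      have hcond : ¬ (start + 1 < n) := by simp at hn; omega
      rw [PySem.List.enumerate_cons]
      simp [PySem.List.enumerate_nil, hcond, PySem.Chars.join_singleton]
    | cons y t =>
      have hn' : start + 1 + (((y :: t).length : Nat) : Int) = n := by
        simp at hn ⊢; omega
      have hcond : start + 1 < n := by simp at hn; omega
      rw [PySem.List.enumerate_cons, List.foldl_cons,
        ih (start + 1) _ hn' (by simp)]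
      simp [hcond, PySem.Chars.join_cons_cons]

theorem segAuxA_base (s : List Char) (fuel : Nat) (h : ':' ∉ s) :
    segAuxA (fuel + 1) s = pvCapB s := by
  have hs : PySem.Chars.splitOn s [':'] = [s] := by
    rw [splitOn_eq]; exact splitRef_of_not_mem ':' s h
  simp only [segAuxA, hs]
  rw [if_neg (show ¬ 1 < ([s] : List (List Char)).length by simp)]
  by_cases hm : s = "Disambiguation".toList ∨ s = "disambiguation".toList
  · have hmem : s ∈ [("Disambiguation".toList : List Char), "disambiguation".toList] := by
      rcases hm with hm | hm <;> simp [hm]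
    rw [if_neg (not_not_intro hmem), if_pos hmem]
    simp only [pvCapB]
    rw [if_pos hm]
  · have hmem : s ∉ [("Disambiguation".toList : List Char), "disambiguation".toList] := by
      simpa using hm
    rw [if_pos hmem]
    simp only [pvCapB]
    rw [if_neg hm]

theorem segA_eq_J2 (s : List Char) : formatPostLinkSegmentA s = J2 s := by
  unfold formatPostLinkSegmentA
  by_cases h : 1 < (splitRef ':' s).length
  · have hmem : ':' ∈ s := by
      by_contra hm
      rw [splitRef_of_not_mem ':' s hm] at h
      simp at h
    have hne : s ≠ [] := fun hnil => by simp [hnil] at hmem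
    obtain ⟨m, hm⟩ : ∃ m, s.length = m + 1 := by
      cases s with
      | nil => exact absurd rfl hne
      | cons a t => exact ⟨t.length, rfl⟩
    have hcnt : splitRef ':' s ≠ [] := splitRef_ne_nil ':' s
    simp only [segAuxA, splitOn_eq, h, if_pos]
    rw [hm]
    rw [joinLoop (segAuxA (m + 1)) [':'] (((splitRef ':' s).length : Nat) : Int)
      (splitRef ':' s) 0 [] (by simp) hcnt]
    have hmap : ∀ p ∈ splitRef ':' s, segAuxA (m + 1) p = pvCapB p :=
      fun p hp => segAuxA_base p m (not_mem_of_mem_splitRef ':' s p hp)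
    rw [List.nil_append, List.map_congr_left hmap]
    rfl
  · have hnm : ':' ∉ s := not_mem_of_length_le ':' s h
    have hb : segAuxA (s.length + 1) s = pvCapB s := segAuxA_base s s.length hnm
    rw [hb]
    simp [J2, splitRef_of_not_mem ':' s hnm, PySem.Chars.join_singleton]

theorem A_eq_JA (p : String) : formatPostLink p = String.mk (JA p.toList) := by
  by_cases h : 1 < (splitRef '-' p.toList).length
  · have hcnt : splitRef '-' p.toList ≠ [] := splitRef_ne_nil '-' p.toList
    simp only [formatPostLink, splitOn_eq, h, if_pos]
    rw [joinLoop formatPostLinkSegmentA ['-'] (((splitRef '-' p.toList).length : Nat) : Int)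
      (splitRef '-' p.toList) 0 [] (by simp) hcnt]
    have hmap : ∀ q ∈ splitRef '-' p.toList, formatPostLinkSegmentA q = J2 q :=
      fun q _ => segA_eq_J2 q
    rw [List.nil_append, List.map_congr_left hmap]
    rfl
  · have hnm : '-' ∉ p.toList := not_mem_of_length_le '-' p.toList h
    simp only [formatPostLink, splitOn_eq, splitRef_of_not_mem '-' p.toList hnm]
    simp [segA_eq_J2, JA, splitRef_of_not_mem '-' p.toList hnm,
      PySem.Chars.join_singleton]

theorem bodyB_spec : ∀ (cs tok : List Char), '-' ∉ tok → ':' ∉ tok →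
    bodyB tok cs = JA (tok ++ cs) := by
  intro cs
  induction cs with
  | nil =>
    intro tok h1 h2
    simp [bodyB, JA, splitRef_of_not_mem '-' tok h1, PySem.Chars.join_singleton,
      J2, splitRef_of_not_mem ':' tok h2]
  | cons c cs ih =>
    intro tok h1 h2
    by_cases hc : c = '-' ∨ c = ':'
    · have hb : bodyB tok (c :: cs) = pvCapB tok ++ c :: bodyB [] cs := by
        simp [bodyB, hc]
      rw [hb, ih [] (by simp) (by simp)]
      rcases hc with hc | hc
      · subst hc
        have hsp : splitRef '-' (tok ++ '-' :: cs) = tok :: splitRef '-' cs := by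
          rw [splitRef_prepend '-' tok ('-' :: cs) h1]
          simp [splitRef]
        rcases hs : splitRef '-' cs with _ | ⟨a, t⟩
        · exact absurd hs (splitRef_ne_nil '-' cs)
        · have hJ2 : J2 tok = pvCapB tok := by
            simp [J2, splitRef_of_not_mem ':' tok h2, PySem.Chars.join_singleton]
          simp [JA, hsp, hs, PySem.Chars.join_cons_cons, hJ2]
      · subst hc
        have hpre : '-' ∉ tok ++ [':'] := by
          intro hmem
          rcases List.mem_append.mp hmem with hmm | hmm
          · exact h1 hmm
          · simp at hmm
        have hsp : splitRef '-' (tok ++ ':' :: cs)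
            = (splitRef '-' cs).modifyHead (fun t => tok ++ ':' :: t) := by
          have hp := splitRef_prepend '-' (tok ++ [':']) cs hpre
          rw [show (tok ++ [':']) ++ cs = tok ++ ':' :: cs by simp] at hp
          rw [hp]
          simp
        rcases hs : splitRef '-' cs with _ | ⟨hh, tt⟩
        · exact absurd hs (splitRef_ne_nil '-' cs)
        · have hJ2' : J2 (tok ++ ':' :: hh) = pvCapB tok ++ ':' :: J2 hh := by
            have hsp2 : splitRef ':' (tok ++ ':' :: hh) = tok :: splitRef ':' hh := by
              rw [splitRef_prepend ':' tok (':' :: hh) h2]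
              simp [splitRef]
            rcases hs2 : splitRef ':' hh with _ | ⟨a2, t2⟩
            · exact absurd hs2 (splitRef_ne_nil ':' hh)
            · simp [J2, hsp2, hs2, PySem.Chars.join_cons_cons]
          rcases tt with _ | ⟨u, t'⟩
          · simp [JA, hsp, hs, hJ2', PySem.Chars.join_singleton]
          · simp [JA, hsp, hs, hJ2', PySem.Chars.join_cons_cons]
    · have hb : bodyB tok (c :: cs) = bodyB (tok ++ [c]) cs := by
        simp [bodyB, hc]
      have hcc := not_or.mp hc
      have h1' : '-' ∉ tok ++ [c] := by
        intro hmem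
        rcases List.mem_append.mp hmem with hmm | hmm
        · exact h1 hmm
        · exact hcc.1 (List.mem_singleton.mp hmm).symm
      have h2' : ':' ∉ tok ++ [c] := by
        intro hmem
        rcases List.mem_append.mp hmem with hmm | hmm
        · exact h2 hmm
        · exact hcc.2 (List.mem_singleton.mp hmm).symm
      rw [hb, ih (tok ++ [c]) h1' h2']
      simp

theorem join_nil_flatten : ∀ (l : List (List Char)),
    PySem.Chars.join [] l = l.flatten := by
  intro l
  induction l with
  | nil => simp [PySem.Chars.join_nil]
  | cons x xs ih =>
    cases xs with
    | nil => simp [PySem.Chars.join_singleton]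
    | cons y t => rw [PySem.Chars.join_cons_cons]; simp [ih]

theorem foldB_spec : ∀ (cs : List Char) (out : List (List Char)) (tok : List Char),
    (((cs.foldl (fun (st : List (List Char) × List Char) ch =>
        if ch = '-' ∨ ch = ':' then (st.1 ++ [pvCapB st.2, [ch]], ([] : List Char))
        else (st.1, st.2 ++ [ch])) (out, tok)).1
      ++ [pvCapB (cs.foldl (fun (st : List (List Char) × List Char) ch =>
        if ch = '-' ∨ ch = ':' then (st.1 ++ [pvCapB st.2, [ch]], ([] : List Char))
        else (st.1, st.2 ++ [ch])) (out, tok)).2]).flatten)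
    = out.flatten ++ bodyB tok cs := by
  intro cs
  induction cs with
  | nil => intro out tok; simp [bodyB]
  | cons c cs ih =>
    intro out tok
    by_cases hc : c = '-' ∨ c = ':'
    · simp only [List.foldl_cons, hc, if_pos, bodyB]
      rw [ih]
      simp
    · simp only [List.foldl_cons, hc, bodyB, if_false]
      rw [ih]

theorem alt_eq_bodyB (p : String) :
    formatPostLink_alt p = String.mk (bodyB [] p.toList) := by
  have h := foldB_spec p.toList [] []
  simp only [List.flatten_nil, List.nil_append] at h
  unfold formatPostLink_alt
  show String.mk (PySem.Chars.join []
      ((p.toList.foldl (fun (st : List (List Char) × List Char) ch =>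
          if ch = '-' ∨ ch = ':' then (st.1 ++ [pvCapB st.2, [ch]], ([] : List Char))
          else (st.1, st.2 ++ [ch])) (([] : List (List Char)), ([] : List Char))).1
        ++ [pvCapB (p.toList.foldl (fun (st : List (List Char) × List Char) ch =>
          if ch = '-' ∨ ch = ':' then (st.1 ++ [pvCapB st.2, [ch]], ([] : List Char))
          else (st.1, st.2 ++ [ch])) (([] : List (List Char)), ([] : List Char))).2]))
    = String.mk (bodyB [] p.toList)
  rw [join_nil_flatten, h]

theorem final_eq (p : String) : formatPostLink p = formatPostLink_alt p := by
  rw [A_eq_JA, alt_eq_bodyB]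
  have h := bodyB_spec p.toList [] (by simp) (by simp)
  simp only [List.nil_append] at h
  rw [h]

-- ===== VERDICT (by name: the statement is the Claim_ definition above) =====
theorem formatPostLink_spec : Claim_equal_formatPostLink := by
  intro p _
  exact final_eq p
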